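-- pv_equiv track=rewrite | github.com/sarcasticDweller/Sudoku-Generator | python/main.py | get_possible_coords
-- ===== SOURCE A (Python) =====
-- ALL_X_COORDS = (1, 2, 3, 4, 5, 6, 7, 8, 9)
--
-- ALL_Y_COORDS = (1, 2, 3, 4, 5, 6, 7, 8, 9)
--
-- def get_possible_coords(taken_coords, x_coords = ALL_X_COORDS, y_coords = ALL_Y_COORDS):
--     """
--     :param taken_coords: list of tuples containing x and y coordinate values
--     :param x_coords: Optional list of all coordinates available
--     :param y_coords: Optional list of all coordinates available
--     :return tuple: Tuple containing possible x and y coordinates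
--     """
--     possible_x_coords = list(x_coords).copy()
--     possible_y_coords = list(y_coords).copy()
--     if len(taken_coords) != 0:
--         for coords in taken_coords:
--             if coords[0] in possible_x_coords:
--                 possible_x_coords.remove(coords[0])
--             if coords[1] in possible_y_coords:
--                 possible_y_coords.remove(coords[1])
--     return possible_x_coords, possible_y_coords
-- ===== SOURCE B (Python) =====
-- ALL_X_COORDS = (1, 2, 3, 4, 5, 6, 7, 8, 9)
--
-- ALL_Y_COORDS = (1, 2, 3, 4, 5, 6, 7, 8, 9)
--
-- def get_possible_coords(taken_coords, x_coords = ALL_X_COORDS, y_coords = ALL_Y_COORDS):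
--     x_counts = {}
--     y_counts = {}
--     for coords in taken_coords:
--         x_counts[coords[0]] = x_counts.get(coords[0], 0) + 1
--         y_counts[coords[1]] = y_counts.get(coords[1], 0) + 1
--     possible_x_coords = []
--     for v in x_coords:
--         if x_counts.get(v, 0) > 0:
--             x_counts[v] = x_counts[v] - 1
--         else:
--             possible_x_coords.append(v)
--     possible_y_coords = []
--     for v in y_coords:
--         if y_counts.get(v, 0) > 0:
--             y_counts[v] = y_counts[v] - 1
--         else:
--             possible_y_coords.append(v)
--     return possible_x_coords, possible_y_coords
-- ===== Notes on version B (the rewrite author's own statement) =====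
-- stated objective: faster
-- what changed: Replaces the per-taken-coordinate linear 'in'+list.remove scans with two count dicts built in one pass over taken_coords, then a single count-capped filtering pass over x_coords and y_coords.
import Mathlib
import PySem

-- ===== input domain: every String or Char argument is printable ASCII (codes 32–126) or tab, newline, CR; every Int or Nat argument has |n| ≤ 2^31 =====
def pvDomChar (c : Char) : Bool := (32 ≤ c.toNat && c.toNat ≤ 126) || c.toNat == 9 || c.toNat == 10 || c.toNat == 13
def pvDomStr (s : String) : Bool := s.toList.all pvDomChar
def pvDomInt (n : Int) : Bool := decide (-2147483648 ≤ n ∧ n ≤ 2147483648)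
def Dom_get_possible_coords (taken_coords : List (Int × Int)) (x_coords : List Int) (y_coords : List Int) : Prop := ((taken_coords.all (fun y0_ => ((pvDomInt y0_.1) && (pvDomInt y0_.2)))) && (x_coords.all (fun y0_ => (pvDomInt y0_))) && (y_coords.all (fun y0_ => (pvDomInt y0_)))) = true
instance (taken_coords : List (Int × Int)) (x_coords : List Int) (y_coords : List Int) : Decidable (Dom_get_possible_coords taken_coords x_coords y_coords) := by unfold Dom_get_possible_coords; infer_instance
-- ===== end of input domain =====

-- ===== PORT A =====
-- B builds count tables once and filters each coordinate list in a single pass (vs A's repeated in+remove scans).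
def get_possible_coords (taken_coords : List (Int × Int)) (x_coords : List Int) (y_coords : List Int) : List Int × List Int :=
  let possible_x_coords := x_coords
  let possible_y_coords := y_coords
  if taken_coords.length ≠ 0 then
    taken_coords.foldl (fun (st : List Int × List Int) coords =>
      (if coords.1 ∈ st.1 then (PySem.List.remove? st.1 coords.1).getD st.1 else st.1,
       if coords.2 ∈ st.2 then (PySem.List.remove? st.2 coords.2).getD st.2 else st.2))
      (possible_x_coords, possible_y_coords)
  else (possible_x_coords, possible_y_coords)

-- ===== PORT B =====
def get_possible_coords_alt (taken_coords : List (Int × Int)) (x_coords : List Int) (y_coords : List Int) : List Int × List Int :=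
  let cxy := taken_coords.foldl
    (fun (d : PySem.Dict Int Int × PySem.Dict Int Int) coords =>
      (d.1.modify coords.1 0 (· + 1), d.2.modify coords.2 0 (· + 1)))
    (PySem.Dict.empty, PySem.Dict.empty)
  let px := x_coords.foldl
    (fun (st : PySem.Dict Int Int × List Int) v =>
      if 0 < st.1.getD v 0 then (st.1.modify v 0 (· - 1), st.2) else (st.1, st.2 ++ [v]))
    (cxy.1, [])
  let py := y_coords.foldl
    (fun (st : PySem.Dict Int Int × List Int) v =>
      if 0 < st.1.getD v 0 then (st.1.modify v 0 (· - 1), st.2) else (st.1, st.2 ++ [v]))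
    (cxy.2, [])
  (px.2, py.2)

-- ===== PRECONDITION & SPEC =====
def Spec_get_possible_coords (taken_coords : List (Int × Int)) (x_coords : List Int) (y_coords : List Int) (out : List Int × List Int) : Prop := out = get_possible_coords_alt taken_coords x_coords y_coords
instance (taken_coords : List (Int × Int)) (x_coords : List Int) (y_coords : List Int) (out : List Int × List Int) : Decidable (Spec_get_possible_coords taken_coords x_coords y_coords out) := by unfold Spec_get_possible_coords; infer_instance

-- ===== CLAIM (what is proved, stated in full; the proofs are below) =====
def Claim_equal_get_possible_coords : Prop := ∀ (taken_coords : List (Int × Int)) (x_coords : List Int) (y_coords : List Int), Dom_get_possible_coords taken_coords x_coords y_coords → Spec_get_possible_coords taken_coords x_coords y_coords (get_possible_coords taken_coords x_coords y_coords)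

-- ===== LEMMAS AND PROOFS =====

-- A's one-axis removal step: remove the first occurrence of v if present.
def pvRemoveStep (l : List Int) (v : Int) : List Int :=
  if v ∈ l then (PySem.List.remove? l v).getD l else l

-- Count-capped filter with an abstract count function (proof-side model of B's pass).
def pvFiltF : List Int → (Int → Int) → List Int
  | [], _ => []
  | x :: xs, c =>
      if 0 < c x then pvFiltF xs (fun k => if k = x then c x - 1 else c k)
      else x :: pvFiltF xs c

theorem pvFiltF_congr (xs : List Int) (c c' : Int → Int)
    (h : ∀ x ∈ xs, c x = c' x) : pvFiltF xs c = pvFiltF xs c' := by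
  induction xs generalizing c c' with
  | nil => rfl
  | cons x xs ih =>
    simp only [pvFiltF]
    rw [h x (by simp)]
    split_ifs with hx
    · exact ih _ _ (fun y hy => by
        by_cases hyx : y = x
        · simp [hyx]
        · simp [hyx, h y (List.mem_cons_of_mem _ hy)])
    · rw [ih _ _ (fun y hy => h y (List.mem_cons_of_mem _ hy))]

theorem pvFiltF_of_nonpos (xs : List Int) (c : Int → Int)
    (h : ∀ x ∈ xs, c x ≤ 0) : pvFiltF xs c = xs := by
  induction xs with
  | nil => rfl
  | cons x xs ih =>
    have hx : ¬ 0 < c x := by have := h x (by simp); omega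
    simp only [pvFiltF, if_neg hx]
    rw [ih (fun y hy => h y (List.mem_cons_of_mem _ hy))]

-- Key step: removing one v then filtering = filtering with v's count bumped by one.
theorem pvFiltF_removeStep (xs : List Int) (v : Int) (c : Int → Int)
    (hc : ∀ k, 0 ≤ c k) :
    pvFiltF (pvRemoveStep xs v) c = pvFiltF xs (fun k => if k = v then c v + 1 else c k) := by
  induction xs generalizing c with
  | nil => simp [pvRemoveStep, pvFiltF]
  | cons x xs ih =>
    by_cases hxv : x = v
    · subst hxv
      have hrm : pvRemoveStep (x :: xs) x = xs := by
        simp [pvRemoveStep, PySem.List.remove?_cons_self]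
      rw [hrm]
      have hpos : (0 : Int) < c x + 1 := by have := hc x; omega
      simp only [pvFiltF, if_pos, hpos]
      apply pvFiltF_congr
      intro y hy
      by_cases hyx : y = x
      · simp only [hyx, if_pos]; omega
      · simp [hyx]
    · have hne : x ≠ v := hxv
      have hstep : pvRemoveStep (x :: xs) v = x :: pvRemoveStep xs v := by
        by_cases hv : v ∈ xs
        · have hmem : v ∈ x :: xs := List.mem_cons_of_mem _ hv
          simp only [pvRemoveStep, if_pos hmem, if_pos hv]
          rw [PySem.List.remove?_cons_of_ne xs hne, PySem.List.remove?_eq_some_erase xs v hv]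
          simp
        · have hmem : v ∉ x :: xs := by
            simp only [List.mem_cons]
            rintro (h | h)
            · exact hne h.symm
            · exact hv h
          simp only [pvRemoveStep, if_neg hmem, if_neg hv]
      rw [hstep]
      simp only [pvFiltF]
      rw [if_neg hne]
      by_cases hx : 0 < c x
      · rw [if_pos hx, if_pos hx]
        have hc' : ∀ k, 0 ≤ (fun k => if k = x then c x - 1 else c k) k := by
          intro k
          by_cases hk : k = x
          · simp only [hk, if_pos]; omega
          · simp only [if_neg hk]; exact hc k
        rw [ih _ hc']
        apply pvFiltF_congr
        intro y hy
        by_cases h1 : y = v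
        · by_cases h2 : y = x
          · exact absurd (h2.symm.trans h1) hne
          · simp [h1, Ne.symm hne]
        · by_cases h2 : y = x
          · simp [h2, hne]
          · simp [h1, h2]
      · rw [if_neg hx, if_neg hx]
        rw [ih c hc]

-- A's fold over one axis equals the count-function filter.
theorem pvRemAll_eq_filtF (vs : List Int) (xs : List Int) :
    vs.foldl pvRemoveStep xs = pvFiltF xs (fun k => (vs.count k : Int)) := by
  induction vs generalizing xs with
  | nil =>
    simp only [List.foldl_nil]
    rw [pvFiltF_of_nonpos]
    intro x _; simp
  | cons v vs ih =>
    simp only [List.foldl_cons]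
    rw [ih (pvRemoveStep xs v)]
    rw [pvFiltF_removeStep xs v _ (fun k => by positivity)]
    apply pvFiltF_congr
    intro y _
    by_cases hyv : y = v
    · simp only [hyv, if_pos, List.count_cons_self]; push_cast; omega
    · simp [hyv, (Ne.symm hyv : v ≠ y)]

-- B's dict pass equals the count-function filter.
theorem pvPass_eq_filtF (xs : List Int) (d : PySem.Dict Int Int) (acc : List Int) :
    (xs.foldl
      (fun (st : PySem.Dict Int Int × List Int) v =>
        if 0 < st.1.getD v 0 then (st.1.modify v 0 (· - 1), st.2) else (st.1, st.2 ++ [v]))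
      (d, acc)).2 = acc ++ pvFiltF xs (fun k => d.getD k 0) := by
  induction xs generalizing d acc with
  | nil => simp [pvFiltF]
  | cons x xs ih =>
    simp only [List.foldl_cons, pvFiltF]
    split_ifs with hx
    · rw [ih]
      congr 1
      apply pvFiltF_congr
      intro y _
      rw [PySem.Dict.getD_modify]
    · rw [ih]
      simp

-- Independent product fold splits into two folds.
theorem pvFoldl_prod {α β γ : Type} (l : List γ) (f : α → γ → α) (g : β → γ → β) (a : α) (b : β) :
    l.foldl (fun (st : α × β) c => (f st.1 c, g st.2 c)) (a, b) = (l.foldl f a, l.foldl g b) := by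
  induction l generalizing a b with
  | nil => rfl
  | cons c l ih => simp only [List.foldl_cons]; exact ih _ _

theorem pvCounter_getD (tc : List (Int × Int)) (pr : Int × Int → Int) (k : Int) :
    (tc.foldl (fun (d : PySem.Dict Int Int) c => d.modify (pr c) 0 (· + 1)) PySem.Dict.empty).getD k 0
      = ((tc.map pr).count k : Int) := by
  rw [show (tc.foldl (fun (d : PySem.Dict Int Int) c => d.modify (pr c) 0 (· + 1)) PySem.Dict.empty)
        = (tc.map pr).foldl (fun d x => d.modify x 0 (· + 1)) PySem.Dict.empty by
      rw [List.foldl_map]]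
  rw [PySem.Dict.getD_foldl_modify_add_one]
  simp [PySem.Dict.getD]

-- One-axis equality: A's removal fold = B's dict pass.
theorem pvAxis (tc : List (Int × Int)) (pr : Int × Int → Int) (xs : List Int) :
    tc.foldl (fun l c => pvRemoveStep l (pr c)) xs
      = (xs.foldl
          (fun (st : PySem.Dict Int Int × List Int) v =>
            if 0 < st.1.getD v 0 then (st.1.modify v 0 (· - 1), st.2) else (st.1, st.2 ++ [v]))
          ((tc.foldl (fun (d : PySem.Dict Int Int) c => d.modify (pr c) 0 (· + 1)) PySem.Dict.empty), [])).2 := by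
  rw [pvPass_eq_filtF, List.nil_append]
  rw [show tc.foldl (fun l c => pvRemoveStep l (pr c)) xs = (tc.map pr).foldl pvRemoveStep xs by
      rw [List.foldl_map]]
  rw [pvRemAll_eq_filtF]
  apply pvFiltF_congr
  intro y _
  rw [pvCounter_getD]

-- ===== VERDICT (by name: the statement is the Claim_ definition above) =====
theorem get_possible_coords_spec : Claim_equal_get_possible_coords := by
  intro tc xs ys _
  unfold Spec_get_possible_coords get_possible_coords get_possible_coords_alt
  simp only []
  rw [pvFoldl_prod tc
      (fun (d : PySem.Dict Int Int) c => d.modify c.1 0 (· + 1))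
      (fun (d : PySem.Dict Int Int) c => d.modify c.2 0 (· + 1))]
  by_cases h : tc.length ≠ 0
  · rw [if_pos h]
    have hsplit := pvFoldl_prod tc
      (fun l (c : Int × Int) => pvRemoveStep l c.1)
      (fun l (c : Int × Int) => pvRemoveStep l c.2) xs ys
    have : tc.foldl (fun (st : List Int × List Int) coords =>
      (if coords.1 ∈ st.1 then (PySem.List.remove? st.1 coords.1).getD st.1 else st.1,
       if coords.2 ∈ st.2 then (PySem.List.remove? st.2 coords.2).getD st.2 else st.2)) (xs, ys)
      = (tc.foldl (fun l (c : Int × Int) => pvRemoveStep l c.1) xs,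
         tc.foldl (fun l (c : Int × Int) => pvRemoveStep l c.2) ys) := by
      rw [← hsplit]; rfl
    rw [this]
    rw [pvAxis tc (·.1) xs, pvAxis tc (·.2) ys]
  · rw [if_neg h]
    have htc : tc = [] := by
      cases tc with
      | nil => rfl
      | cons a l => simp at h
    subst htc
    simp only [List.foldl_nil]
    rw [pvPass_eq_filtF, pvPass_eq_filtF, List.nil_append, List.nil_append]
    rw [pvFiltF_of_nonpos _ _ (fun y _ => by simp [PySem.Dict.getD, PySem.Dict.get?, PySem.Dict.empty]),
        pvFiltF_of_nonpos _ _ (fun y _ => by simp [PySem.Dict.getD, PySem.Dict.get?, PySem.Dict.empty])]
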